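-- pv_equiv track=rewrite | github.com/Merlin2098/tinker | agent_tools/wrappers/markdown_explorer_wrapper.py | _count_code_fences
-- ===== SOURCE A (Python) =====
-- def _count_code_fences(lines: list[str]) -> int:
--     count = 0
--     in_fence = False
--     for line in lines:
--         if line.strip().startswith("```"):
--             if in_fence:
--                 count += 1
--             in_fence = not in_fence
--     return count
-- ===== SOURCE B (Python) =====
-- def _count_code_fences(lines: list[str]) -> int:
--     return sum(1 for line in lines if line.strip().startswith("```")) // 2
-- ===== Notes on version B (the rewrite author's own statement) =====
-- stated objective: simpler
-- what changed: Replaces the toggling in_fence state machine with a stateless count of fence lines followed by integer division by 2 (an unclosed trailing fence is truncated by the floor division).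
import Mathlib
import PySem

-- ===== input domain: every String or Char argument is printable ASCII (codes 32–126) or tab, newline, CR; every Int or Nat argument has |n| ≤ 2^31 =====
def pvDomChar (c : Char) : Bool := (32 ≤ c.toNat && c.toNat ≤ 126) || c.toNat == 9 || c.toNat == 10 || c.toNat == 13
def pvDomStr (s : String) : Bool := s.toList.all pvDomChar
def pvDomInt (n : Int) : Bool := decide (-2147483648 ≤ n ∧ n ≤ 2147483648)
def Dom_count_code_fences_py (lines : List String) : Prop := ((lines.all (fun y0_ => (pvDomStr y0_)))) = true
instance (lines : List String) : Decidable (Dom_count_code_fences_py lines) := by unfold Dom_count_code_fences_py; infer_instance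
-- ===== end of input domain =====

-- B replaces A's toggling in_fence state machine by counting fence lines and floor-dividing by 2 (simpler).

-- ===== PORT A =====
-- the fence-line test: line.strip().startswith("```")
def pvIsFence (line : String) : Bool :=
  PySem.Str.startswith (PySem.Str.strip line) "```"

def count_code_fences_py (lines : List String) : Int :=
  (lines.foldl (fun (st : Int × Bool) line =>
      if pvIsFence line then
        (if st.2 then st.1 + 1 else st.1, !st.2)
      else st) (0, false)).1

-- ===== PORT B =====
def count_code_fences_py_alt (lines : List String) : Int :=
  PySem.Int.floordiv ((lines.countP (fun line => pvIsFence line) : Nat) : Int) 2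

-- ===== PRECONDITION & SPEC =====
def Spec_count_code_fences_py (lines : List String) (out : Int) : Prop := out = count_code_fences_py_alt lines
instance (lines : List String) (out : Int) : Decidable (Spec_count_code_fences_py lines out) := by unfold Spec_count_code_fences_py; infer_instance

-- ===== CLAIM (what is proved, stated in full; the proofs are below) =====
def Claim_equal_count_code_fences_py : Prop := ∀ (lines : List String), Dom_count_code_fences_py lines → Spec_count_code_fences_py lines (count_code_fences_py lines)

-- ===== LEMMAS AND PROOFS =====

-- Loop invariant: starting from state (c, f), A's fold returns c + (k + [f]) / 2
-- where k is the number of fence lines in the remaining list.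
theorem pvFoldInvariant (l : List String) : ∀ (c : Int) (f : Bool),
    (l.foldl (fun (st : Int × Bool) line =>
        if pvIsFence line then
          (if st.2 then st.1 + 1 else st.1, !st.2)
        else st) (c, f)).1
      = c + (((l.countP (fun line => pvIsFence line) + (if f then 1 else 0)) / 2 : Nat) : Int) := by
  induction l with
  | nil => intro c f; cases f <;> simp
  | cons hd tl ih =>
    intro c f
    by_cases h : pvIsFence hd = true <;> cases f <;>
      simp [List.foldl_cons, List.countP_cons, h, ih] <;> push_cast <;> omega

theorem count_code_fences_py_eq (lines : List String) :
    count_code_fences_py lines = count_code_fences_py_alt lines := by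
  unfold count_code_fences_py count_code_fences_py_alt
  rw [pvFoldInvariant]
  rw [show ((2 : Int)) = ((2 : Nat) : Int) from rfl, PySem.Int.floordiv_natCast]
  simp

-- ===== VERDICT (by name: the statement is the Claim_ definition above) =====
theorem count_code_fences_py_spec : Claim_equal_count_code_fences_py := by
  intro lines _
  unfold Spec_count_code_fences_py
  exact count_code_fences_py_eq lines
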